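-- pv_equiv track=rewrite | github.com/jareb1278515513/Crypto_toolkit | des_crypto.py | get_custom_ascii_charset
-- ===== SOURCE A (Python) =====
-- def get_custom_ascii_charset(start_ascii, end_ascii):
--     """
--     根据ASCII范围生成自定义字符集
--     Args:
--         start_ascii: 起始ASCII值 (0-255)
--         end_ascii: 终止ASCII值 (0-255)
--     Returns:
--         str: 自定义字符集字符串
--     """
--     if start_ascii < 0 or end_ascii > 255:
--         raise ValueError("ASCII值必须在0-255范围内")
--     if start_ascii > end_ascii:
--         raise ValueError("起始ASCII值不能大于终止ASCII值")
--
--     charset = ""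
--     for i in range(start_ascii, end_ascii + 1):
--         try:
--             char = chr(i)
--             # 过滤掉一些控制字符，但保留可打印的扩展ASCII字符
--             if i >= 32 or char in ['\t', '\n', '\r']:
--                 charset += char
--         except ValueError:
--             continue  # 跳过无效字符
--     return charset
-- ===== SOURCE B (Python) =====
-- def get_custom_ascii_charset(start_ascii, end_ascii):
--     if start_ascii < 0 or end_ascii > 255:
--         raise ValueError("ASCII值必须在0-255范围内")
--     if start_ascii > end_ascii:
--         raise ValueError("起始ASCII值不能大于终止ASCII值")
--     prefix = ''.join(chr(c) for c in (9, 10, 13) if start_ascii <= c <= end_ascii)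
--     body = ''.join(map(chr, range(max(start_ascii, 32), end_ascii + 1)))
--     return prefix + body
-- ===== Notes on version B (the rewrite author's own statement) =====
-- stated objective: alternative
-- what changed: Instead of scanning every code point with a keep/drop predicate, B constructs the result directly as two ascending pieces: the in-range members of {9,10,13} followed by the contiguous block chr(max(start,32))..chr(end).
import Mathlib
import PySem

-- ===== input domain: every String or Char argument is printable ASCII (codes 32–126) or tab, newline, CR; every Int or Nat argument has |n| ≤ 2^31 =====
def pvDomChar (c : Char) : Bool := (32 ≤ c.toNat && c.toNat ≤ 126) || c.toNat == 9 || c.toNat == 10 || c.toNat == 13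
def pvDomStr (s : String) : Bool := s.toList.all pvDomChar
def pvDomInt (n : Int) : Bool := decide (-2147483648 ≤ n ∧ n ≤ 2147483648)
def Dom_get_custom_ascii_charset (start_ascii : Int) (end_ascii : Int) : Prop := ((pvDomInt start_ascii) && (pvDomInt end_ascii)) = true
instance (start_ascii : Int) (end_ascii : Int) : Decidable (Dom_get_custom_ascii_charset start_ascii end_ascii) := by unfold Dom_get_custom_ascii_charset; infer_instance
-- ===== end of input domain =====

-- B builds the charset as two concatenated ascending pieces (in-range controls {9,10,13}, then the
-- contiguous block max(start,32)..end) instead of A's filtered scan over every code point; same values.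

-- ===== PORT A =====
-- both raise branches return "" here; exactly those inputs are excluded by Pre_
def get_custom_ascii_charset (start_ascii : Int) (end_ascii : Int) : String :=
  if start_ascii < 0 ∨ end_ascii > 255 then ""
  else if start_ascii > end_ascii then ""
  else
    String.ofList ((PySem.List.pyRange start_ascii (end_ascii + 1) 1).foldl
      (fun acc i =>
        if 32 ≤ i ∨ Char.ofNat i.toNat ∈ ['\t', '\n', '\r'] then acc ++ [Char.ofNat i.toNat]
        else acc) [])

-- ===== PORT B =====
def get_custom_ascii_charset_alt (start_ascii : Int) (end_ascii : Int) : String :=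
  if start_ascii < 0 ∨ end_ascii > 255 then ""
  else if start_ascii > end_ascii then ""
  else
    String.ofList
      ((([9, 10, 13] : List Int).filter
          (fun c => decide (start_ascii ≤ c ∧ c ≤ end_ascii))).map (fun c => Char.ofNat c.toNat)
       ++ (PySem.List.pyRange (max start_ascii 32) (end_ascii + 1) 1).map
            (fun i => Char.ofNat i.toNat))

-- ===== PRECONDITION & SPEC =====
-- Pre_ excludes exactly the inputs on which A raises ValueError (range outside 0..255, or start > end)
def Pre_get_custom_ascii_charset (start_ascii : Int) (end_ascii : Int) : Prop :=
  0 ≤ start_ascii ∧ end_ascii ≤ 255 ∧ start_ascii ≤ end_ascii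
instance (start_ascii : Int) (end_ascii : Int) : Decidable (Pre_get_custom_ascii_charset start_ascii end_ascii) := by unfold Pre_get_custom_ascii_charset; infer_instance
def pvWitness_get_custom_ascii_charset : Int × Int := (0, 255)

def Spec_get_custom_ascii_charset (start_ascii : Int) (end_ascii : Int) (out : String) : Prop := out = get_custom_ascii_charset_alt start_ascii end_ascii
instance (start_ascii : Int) (end_ascii : Int) (out : String) : Decidable (Spec_get_custom_ascii_charset start_ascii end_ascii out) := by unfold Spec_get_custom_ascii_charset; infer_instance

-- ===== CLAIM (what is proved, stated in full; the proofs are below) =====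
def Claim_equal_get_custom_ascii_charset : Prop := ∀ (start_ascii : Int) (end_ascii : Int), Dom_get_custom_ascii_charset start_ascii end_ascii → Pre_get_custom_ascii_charset start_ascii end_ascii → Spec_get_custom_ascii_charset start_ascii end_ascii (get_custom_ascii_charset start_ascii end_ascii)

-- ===== LEMMAS AND PROOFS =====

-- the filtered scan equals the two ascending pieces, as code lists
set_option maxRecDepth 8192 in
lemma filter_range_split (s e : Int) (hs : 0 ≤ s) (he : e ≤ 255) (hse : s ≤ e) :
    (PySem.List.pyRange s (e + 1) 1).filter
      (fun i => decide (32 ≤ i ∨ Char.ofNat i.toNat ∈ ['\t', '\n', '\r'])) =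
    (([9, 10, 13] : List Int).filter (fun c => decide (s ≤ c ∧ c ≤ e)))
      ++ PySem.List.pyRange (max s 32) (e + 1) 1 := by
  have hchar : ∀ i : Int, 0 ≤ i → i ≤ 255 →
      ((Char.ofNat i.toNat = '\t' ∨ Char.ofNat i.toNat = '\n' ∨ Char.ofNat i.toNat = '\r')
        ↔ (i = 9 ∨ i = 10 ∨ i = 13)) := by
    intro i h1 h2
    interval_cases i <;> simp
  apply PySem.List.eq_of_perm_of_pairwise_le_of_injective (key := fun x : Int => x)
    (fun a b h => h)
  · rw [List.perm_ext_iff_of_nodup]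
    · intro x
      simp only [List.mem_filter, PySem.List.mem_pyRange_one, List.mem_append,
        decide_eq_true_eq, List.mem_cons, List.not_mem_nil, or_false]
      constructor
      · rintro ⟨⟨hx1, hx2⟩, hx3⟩
        rcases hx3 with h32 | hc
        · right; omega
        · rw [hchar x (by omega) (by omega)] at hc
          left; exact ⟨by tauto, hx1, by omega⟩
      · rintro (⟨hx9, hx1, hx2⟩ | ⟨hx1, hx2⟩)
        · refine ⟨⟨hx1, by omega⟩, Or.inr ?_⟩
          rw [hchar x (by omega) (by omega)]; tauto
        · exact ⟨⟨by omega, hx2⟩, Or.inl (by omega)⟩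
    · exact (PySem.List.nodup_pyRange_one s (e + 1)).filter _
    · refine List.Nodup.append ((List.nodup_cons.mpr ?_).filter _)
        (PySem.List.nodup_pyRange_one _ _) ?_
      · constructor
        · decide
        · exact List.nodup_cons.mpr ⟨by decide, List.nodup_singleton _⟩
      · intro x hx1 hx2
        simp only [List.mem_filter, List.mem_cons, List.not_mem_nil, or_false,
          decide_eq_true_eq] at hx1
        rw [PySem.List.mem_pyRange_one] at hx2
        omega
  · exact ((PySem.List.pairwise_lt_pyRange_one _ _).filter _).imp le_of_lt
  · rw [List.pairwise_append]
    refine ⟨?_, (PySem.List.pairwise_lt_pyRange_one _ _).imp le_of_lt, ?_⟩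
    · exact List.Pairwise.filter _ (by decide)
    · intro a ha b hb
      simp only [List.mem_filter, List.mem_cons, List.not_mem_nil, or_false,
        decide_eq_true_eq] at ha
      rw [PySem.List.mem_pyRange_one] at hb
      omega

theorem get_custom_ascii_charset_spec : Claim_equal_get_custom_ascii_charset := by
  intro s e _ hpre
  obtain ⟨hs, he, hse⟩ := hpre
  show get_custom_ascii_charset s e = get_custom_ascii_charset_alt s e
  unfold get_custom_ascii_charset get_custom_ascii_charset_alt
  rw [if_neg (by omega), if_neg (by omega), if_neg (by omega), if_neg (by omega)]
  rw [show (fun (acc : List Char) (i : Int) =>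
        if 32 ≤ i ∨ Char.ofNat i.toNat ∈ ['\t', '\n', '\r'] then acc ++ [Char.ofNat i.toNat]
        else acc)
      = (fun acc i =>
        if (32 ≤ i ∨ Char.ofNat i.toNat ∈ ['\t', '\n', '\r']) then acc ++ [(fun j : Int => Char.ofNat j.toNat) i]
        else acc) from rfl]
  rw [PySem.List.foldl_append_ite]
  rw [filter_range_split s e hs he hse, List.map_append]
  simp
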